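-- pv_equiv track=rewrite | github.com/yasufumi-nakata/Pytra | src/backends/cs/emitter/cs_emitter.py | _render_bytes_literal_expr
-- ===== SOURCE A (Python) =====
-- def _render_bytes_literal_expr(raw_repr: str) -> str:
--     raw = raw_repr.strip()
--     if raw == "":
--         return ""
--     if not (raw.startswith("b\"") or raw.startswith("b'")):
--         return ""
--     if len(raw) < 3:
--         return ""
--     quote = raw[1]
--     if raw[-1] != quote:
--         return ""
--     body = raw[2:-1]
--     parsed: list[int] = []
--     i = 0
--     while i < len(body):
--         ch = body[i]
--         if ch != "\\":
--             parsed.append(ord(ch) & 0xFF)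
--             i += 1
--             continue
--         if i + 1 >= len(body):
--             parsed.append(ord("\\"))
--             i += 1
--             continue
--         nxt = body[i + 1]
--         if nxt == "x" and i + 3 < len(body):
--             h1 = body[i + 2]
--             h2 = body[i + 3]
--             hex_digits = "0123456789abcdefABCDEF"
--             if h1 in hex_digits and h2 in hex_digits:
--                 parsed.append(int(h1 + h2, 16))
--                 i += 4
--                 continue
--         if nxt >= "0" and nxt <= "7":
--             j = i + 1
--             oct_txt = ""
--             count = 0
--             while j < len(body) and count < 3 and body[j] >= "0" and body[j] <= "7":
--                 oct_txt += body[j]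
--                 j += 1
--                 count += 1
--             if oct_txt != "":
--                 parsed.append(int(oct_txt, 8) & 0xFF)
--                 i = j
--                 continue
--         esc_map: dict[str, int] = {
--             "\\": ord("\\"),
--             "'": ord("'"),
--             '"': ord('"'),
--             "a": 7,
--             "b": 8,
--             "f": 12,
--             "n": 10,
--             "r": 13,
--             "t": 9,
--             "v": 11,
--         }
--         if nxt in esc_map:
--             parsed.append(esc_map[nxt])
--             i += 2
--             continue
--         parsed.append(ord(nxt) & 0xFF)
--         i += 2
--     elems: list[str] = []
--     for b in parsed:
--         elems.append("(byte)" + str(int(b)))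
--     return "new System.Collections.Generic.List<byte> { " + ", ".join(elems) + " }"
-- ===== SOURCE B (Python) =====
-- def _render_bytes_literal_expr(raw_repr: str) -> str:
--     raw = raw_repr.strip()
--     if len(raw) < 3 or raw[0] != "b" or raw[1] not in "'\"" or raw[-1] != raw[1]:
--         return ""
--     esc = {"\\": 92, "'": 39, '"': 34, "a": 7, "b": 8, "f": 12,
--            "n": 10, "r": 13, "t": 9, "v": 11}
--     hexdig = "0123456789abcdefABCDEF"
--     out = []
--
--     def normal(c):
--         # plain-character handling; returns the next state
--         if c == "\\":
--             return ("E",)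
--         out.append(ord(c) & 0xFF)
--         return ("N",)
--
--     # one-pass character state machine:
--     # ("N",) plain  ("E",) after backslash  ("X",) after \x
--     # ("X2", h) after \x<hexdigit>  ("O", digits) inside an octal escape
--     state = ("N",)
--     for c in raw[2:-1]:
--         tag = state[0]
--         if tag == "N":
--             state = normal(c)
--         elif tag == "E":
--             if c == "x":
--                 state = ("X",)
--             elif "0" <= c <= "7":
--                 state = ("O", c)
--             else:
--                 out.append(esc.get(c, ord(c) & 0xFF))
--                 state = ("N",)
--         elif tag == "X":
--             if c in hexdig:
--                 state = ("X2", c)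
--             else:
--                 out.append(120)
--                 state = normal(c)
--         elif tag == "X2":
--             if c in hexdig:
--                 out.append(int(state[1] + c, 16))
--                 state = ("N",)
--             else:
--                 out.append(120)
--                 out.append(ord(state[1]))
--                 state = normal(c)
--         else:  # "O"
--             digs = state[1]
--             if "0" <= c <= "7" and len(digs) < 3:
--                 digs += c
--                 if len(digs) == 3:
--                     out.append(int(digs, 8) & 0xFF)
--                     state = ("N",)
--                 else:
--                     state = ("O", digs)
--             else:
--                 out.append(int(digs, 8) & 0xFF)
--                 state = normal(c)
--     # flush the pending state at end of body
--     tag = state[0]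
--     if tag == "E":
--         out.append(92)
--     elif tag == "X":
--         out.append(120)
--     elif tag == "X2":
--         out.append(120)
--         out.append(ord(state[1]))
--     elif tag == "O":
--         out.append(int(state[1], 8) & 0xFF)
--     return ("new System.Collections.Generic.List<byte> { "
--             + ", ".join("(byte)" + str(b) for b in out) + " }")
-- ===== Notes on version B (the rewrite author's own statement) =====
-- stated objective: alternative
-- what changed: A's index-based while loop with multi-character lookahead and an inner octal-collecting loop is replaced by a single left-to-right character pass driven by an explicit 5-state machine (plain/escape/hex-1/hex-2/octal) with an end-of-input flush; the guard checks are merged into one index-based condition.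
import Mathlib
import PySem

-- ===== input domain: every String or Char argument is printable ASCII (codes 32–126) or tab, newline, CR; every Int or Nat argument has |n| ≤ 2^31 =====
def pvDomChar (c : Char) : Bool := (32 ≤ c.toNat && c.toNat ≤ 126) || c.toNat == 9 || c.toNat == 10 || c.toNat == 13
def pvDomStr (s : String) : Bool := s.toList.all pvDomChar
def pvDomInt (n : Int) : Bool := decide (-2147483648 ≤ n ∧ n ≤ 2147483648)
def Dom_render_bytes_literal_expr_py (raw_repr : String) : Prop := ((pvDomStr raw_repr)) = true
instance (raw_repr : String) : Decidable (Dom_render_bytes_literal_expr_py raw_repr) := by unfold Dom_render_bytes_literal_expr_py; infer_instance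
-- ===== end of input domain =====

-- B replaces A's index-based while loop with lookahead by a one-pass character
-- state machine (a fold with explicit states) over the literal body; objective: alternative.

-- shared character-class / numeric helpers (both Pythons use the same literals)
def pvHexDigits : List Char :=
  ['0','1','2','3','4','5','6','7','8','9','a','b','c','d','e','f','A','B','C','D','E','F']

def pvIsHex (c : Char) : Bool := pvHexDigits.contains c

def pvIsOct (c : Char) : Bool := decide ('0' ≤ c ∧ c ≤ '7')

-- hand port of int(<one hex digit>, 16)'s digit value (exact on hex digits)
def pvHexVal (c : Char) : Int :=
  if c ≤ '9' then (c.toNat : Int) - 48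
  else if c ≤ 'F' then (c.toNat : Int) - 55
  else (c.toNat : Int) - 87

-- hand port of int(<octal digit string>, 8) (exact on nonempty octal-digit strings)
def pvOctVal (ds : List Char) : Int := ds.foldl (fun a c => a * 8 + ((c.toNat : Int) - 48)) 0

-- the escape dictionary shared by both sources
def pvEscDict : PySem.Dict Char Int :=
  PySem.Dict.ofList [('\\', 92), ('\'', 39), ('"', 34), ('a', 7), ('b', 8),
                     ('f', 12), ('n', 10), ('r', 13), ('t', 9), ('v', 11)]

-- ===== PORT A =====

-- A's "nxt == 'x' and i + 3 < len(body) and both hex" test on the suffix after '\x'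
def pvHexOK (cs : List Char) : Bool :=
  match cs with
  | h1 :: h2 :: _ => pvIsHex h1 && pvIsHex h2
  | _ => false

-- A's inner octal while loop (j, oct_txt, count), transliterated on the suffix
def pvOctTake (cs : List Char) (count : Nat) : List Char :=
  match cs with
  | [] => []
  | c :: t => if count < 3 ∧ pvIsOct c = true then c :: pvOctTake t (count + 1) else []

-- A's while loop over body with index i, transliterated as recursion on the suffix
-- body[i:] (each branch advances i by exactly the length it drops here)
def pvParseA : List Char → List Int
  | [] => []
  | ch :: rest =>
    if ch ≠ '\\' then ((ch.toNat : Int) % 256) :: pvParseA rest   -- ord(ch) & 0xFF = % 256 (nonneg)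
    else
      match rest with
      | [] => 92 :: pvParseA []            -- i + 1 >= len(body)
      | nxt :: rest2 =>
        if nxt = 'x' ∧ pvHexOK rest2 = true then
          match rest2 with
          | h1 :: h2 :: t => (pvHexVal h1 * 16 + pvHexVal h2) :: pvParseA t   -- int(h1+h2, 16)
          | _ => []                        -- unreachable: pvHexOK rest2 = true forces the shape
        else if pvIsOct nxt = true then
          let oct := pvOctTake (nxt :: rest2) 0
          if h : oct = [] then             -- oct_txt == "" (never holds here, kept as in A)
            match PySem.Dict.get? pvEscDict nxt with
            | some v => v :: pvParseA rest2
            | none => ((nxt.toNat : Int) % 256) :: pvParseA rest2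
          else (pvOctVal oct % 256) :: pvParseA ((nxt :: rest2).drop oct.length)
        else
          match PySem.Dict.get? pvEscDict nxt with
          | some v => v :: pvParseA rest2
          | none => ((nxt.toNat : Int) % 256) :: pvParseA rest2
  termination_by cs => cs.length
  decreasing_by
  all_goals (simp [*] <;> omega)

def render_bytes_literal_expr_py (raw_repr : String) : String :=
  let raw := PySem.Str.strip raw_repr
  if raw = "" then ""
  else if ¬ (PySem.Str.startswith raw "b\"" = true ∨ PySem.Str.startswith raw "b'" = true) then ""
  else if PySem.Str.len raw < 3 then ""
  else if PySem.Str.pyGet? raw (-1) ≠ PySem.Str.pyGet? raw 1 then ""   -- raw[-1] != quote (both in range here)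
  else
    let body := PySem.Str.slice raw (some 2) (some (-1))
    let parsed := pvParseA body.toList
    "new System.Collections.Generic.List<byte> { " ++
      PySem.Str.join ", " (parsed.map (fun b => "(byte)" ++ PySem.Int.toStr b)) ++ " }"

-- ===== PORT B =====

-- machine states: ("N",) | ("E",) | ("X",) | ("X2", h) | ("O", digits)
inductive PvSt where
  | N : PvSt
  | E : PvSt
  | X : PvSt
  | X2 : Char → PvSt
  | O : List Char → PvSt
  deriving DecidableEq, Repr

-- normal(c): plain-character handling
def pvNormal (out : List Int) (c : Char) : PvSt × List Int :=
  if c = '\\' then (.E, out) else (.N, out ++ [(c.toNat : Int) % 256])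

-- one step of the machine on character c
def pvStep (s : PvSt × List Int) (c : Char) : PvSt × List Int :=
  match s with
  | (.N, out) => pvNormal out c
  | (.E, out) =>
      if c = 'x' then (.X, out)
      else if pvIsOct c = true then (.O [c], out)
      else (.N, out ++ [PySem.Dict.getD pvEscDict c ((c.toNat : Int) % 256)])
  | (.X, out) =>
      if pvIsHex c = true then (.X2 c, out)
      else pvNormal (out ++ [120]) c
  | (.X2 h, out) =>
      if pvIsHex c = true then (.N, out ++ [pvHexVal h * 16 + pvHexVal c])
      else pvNormal (out ++ [120, (h.toNat : Int)]) c
  | (.O digs, out) =>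
      if pvIsOct c = true ∧ digs.length < 3 then
        if (digs ++ [c]).length = 3 then (.N, out ++ [pvOctVal (digs ++ [c]) % 256])
        else (.O (digs ++ [c]), out)
      else pvNormal (out ++ [pvOctVal digs % 256]) c

-- flush the pending state at end of body
def pvFlush (s : PvSt) : List Int :=
  match s with
  | .N => []
  | .E => [92]
  | .X => [120]
  | .X2 h => [120, (h.toNat : Int)]
  | .O digs => [pvOctVal digs % 256]

def render_bytes_literal_expr_py_alt (raw_repr : String) : String :=
  let raw := PySem.Str.strip raw_repr
  if PySem.Str.len raw < 3 ∨ PySem.Str.pyGet? raw 0 ≠ some 'b'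
      ∨ ¬ (PySem.Str.pyGet? raw 1 = some '\'' ∨ PySem.Str.pyGet? raw 1 = some '"')
      ∨ PySem.Str.pyGet? raw (-1) ≠ PySem.Str.pyGet? raw 1 then ""
  else
    let body := PySem.Str.slice raw (some 2) (some (-1))
    let fin := List.foldl pvStep (.N, []) body.toList
    let out := fin.2 ++ pvFlush fin.1
    "new System.Collections.Generic.List<byte> { " ++
      PySem.Str.join ", " (out.map (fun b => "(byte)" ++ PySem.Int.toStr b)) ++ " }"

-- ===== PRECONDITION & SPEC =====
def Spec_render_bytes_literal_expr_py (raw_repr : String) (out : String) : Prop := out = render_bytes_literal_expr_py_alt raw_repr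
instance (raw_repr : String) (out : String) : Decidable (Spec_render_bytes_literal_expr_py raw_repr out) := by unfold Spec_render_bytes_literal_expr_py; infer_instance

-- ===== CLAIM (what is proved, stated in full; the proofs are below) =====
def Claim_equal_render_bytes_literal_expr_py : Prop := ∀ (raw_repr : String), Dom_render_bytes_literal_expr_py raw_repr → Spec_render_bytes_literal_expr_py raw_repr (render_bytes_literal_expr_py raw_repr)

-- ===== LEMMAS AND PROOFS =====

-- the chars A's loop has already consumed that B's state still remembers
def pvPre : PvSt → List Char
  | .N => []
  | .E => ['\\']
  | .X => ['\\', 'x']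
  | .X2 h => ['\\', 'x', h]
  | .O digs => '\\' :: digs

-- machine-state invariant: remembered digits are octal, 1 or 2 of them; X2 holds a hex digit
def pvInv : PvSt → Prop
  | .X2 h => pvIsHex h = true
  | .O digs => (∀ x ∈ digs, pvIsOct x = true) ∧ (digs.length = 1 ∨ digs.length = 2)
  | _ => True

lemma pvOct_ne_x {c : Char} (h : pvIsOct c = true) : c ≠ 'x' := by
  rintro rfl; exact absurd h (by decide)

lemma pvHex_ne_bs {c : Char} (h : pvIsHex c = true) : c ≠ '\\' := by
  rintro rfl; exact absurd h (by decide)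

lemma pvHex_mem {c : Char} (h : pvIsHex c = true) : c ∈ pvHexDigits := by
  simpa [pvIsHex] using h

lemma pvHex_lt {c : Char} (h : pvIsHex c = true) : c.toNat < 256 := by
  have := pvHex_mem h
  fin_cases this <;> decide

lemma pvHex_mod {c : Char} (h : pvIsHex c = true) : ((c.toNat : Int) % 256) = (c.toNat : Int) := by
  have := pvHex_lt h; omega

lemma pvHexOK_false_head {c : Char} {cs : List Char} (h : pvIsHex c = false) :
    pvHexOK (c :: cs) = false := by
  cases cs <;> simp [pvHexOK, h]

lemma pA_nil : pvParseA [] = [] := by rw [pvParseA]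

lemma pA_plain {ch : Char} {rest : List Char} (h : ch ≠ '\\') :
    pvParseA (ch :: rest) = ((ch.toNat : Int) % 256) :: pvParseA rest := by
  rw [pvParseA.eq_def]; simp [h]

lemma pA_bs_nil : pvParseA ['\\'] = [92] := by
  rw [pvParseA.eq_def]; simp [pA_nil]

lemma pA_hex {h1 h2 : Char} {t : List Char} (e1 : pvIsHex h1 = true) (e2 : pvIsHex h2 = true) :
    pvParseA ('\\' :: 'x' :: h1 :: h2 :: t)
      = (pvHexVal h1 * 16 + pvHexVal h2) :: pvParseA t := by
  rw [pvParseA.eq_def]; simp [pvHexOK, e1, e2]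

lemma pA_esc {c : Char} {cs : List Char} (hx : c ≠ 'x') (ho : pvIsOct c = false) :
    pvParseA ('\\' :: c :: cs)
      = (match PySem.Dict.get? pvEscDict c with
         | some v => v
         | none => ((c.toNat : Int) % 256)) :: pvParseA cs := by
  cases hE : PySem.Dict.get? pvEscDict c <;>
    (rw [pvParseA.eq_def]; simp [hx, ho, hE])

lemma pA_x_fall {cs : List Char} (h : pvHexOK cs = false) :
    pvParseA ('\\' :: 'x' :: cs) = 120 :: pvParseA cs := by
  have h1 : pvIsOct 'x' = false := by decide
  have h2 : PySem.Dict.get? pvEscDict 'x' = none := by decide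
  rw [pvParseA.eq_def]; simp [h, h1, h2]

lemma octTake_cons_oct (n : Nat) {c : Char} {t : List Char}
    (hc : pvIsOct c = true) (hn : n < 3) :
    pvOctTake (c :: t) n = c :: pvOctTake t (n + 1) := by
  rw [pvOctTake]; simp [hc, hn]

lemma octTake_three (t : List Char) : pvOctTake t 3 = [] := by
  cases t <;> simp [pvOctTake]

lemma pvHexOK_false_snd {h c : Char} {cs : List Char} (hc : pvIsHex c = false) :
    pvHexOK (h :: c :: cs) = false := by
  simp [pvHexOK, hc]

lemma pA_oct {c : Char} {cs : List Char} (hc : pvIsOct c = true) :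
    pvParseA ('\\' :: c :: cs)
      = (pvOctVal (pvOctTake (c :: cs) 0) % 256)
          :: pvParseA ((c :: cs).drop (pvOctTake (c :: cs) 0).length) := by
  have hx := pvOct_ne_x hc
  have hne : pvOctTake (c :: cs) 0 ≠ [] := by
    rw [octTake_cons_oct 0 hc (by omega)]; simp
  rw [pvParseA.eq_def]
  simp [hx, hc, hne]

lemma pvInv_normal (out : List Int) (c : Char) : pvInv (pvNormal out c).1 := by
  by_cases h : c = '\\' <;> simp [pvNormal, h, pvInv]

lemma pv_normal_sim (out : List Int) (c : Char) (cs : List Char) :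
    (pvNormal out c).2 ++ pvParseA (pvPre (pvNormal out c).1 ++ cs)
      = out ++ pvParseA (c :: cs) := by
  by_cases h : c = '\\'
  · subst h; simp [pvNormal, pvPre]
  · simp [pvNormal, h, pvPre, pA_plain h]

lemma pv_sim (cs : List Char) : ∀ (st : PvSt) (out : List Int), pvInv st →
    (List.foldl pvStep (st, out) cs).2 ++ pvFlush (List.foldl pvStep (st, out) cs).1
      = out ++ pvParseA (pvPre st ++ cs) := by
  induction cs with
  | nil =>
    intro st out hInv
    cases st with
    | N => simp [pvFlush, pvPre, pA_nil]
    | E => simp [pvFlush, pvPre, pA_bs_nil]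
    | X =>
      simp only [List.foldl_nil, pvFlush, pvPre, List.append_nil]
      rw [pA_x_fall (show pvHexOK [] = false from rfl), pA_nil]
    | X2 h =>
      have hh : pvIsHex h = true := hInv
      simp only [List.foldl_nil, pvFlush, pvPre, List.append_nil]
      rw [pA_x_fall (show pvHexOK [h] = false from rfl), pA_plain (pvHex_ne_bs hh),
        pA_nil, pvHex_mod hh]
    | O digs =>
      obtain ⟨hall, hlen⟩ := hInv
      simp only [List.foldl_nil, pvFlush, pvPre, List.append_nil]
      rcases digs with _ | ⟨c1, _ | ⟨c2, _ | ⟨c3, t⟩⟩⟩ <;> simp at hlen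
      · have h1 : pvIsOct c1 = true := hall _ (by simp)
        rw [pA_oct h1]
        simp [pvOctTake, h1, pA_nil]
      · have h1 : pvIsOct c1 = true := hall _ (by simp)
        have h2 : pvIsOct c2 = true := hall _ (by simp)
        rw [pA_oct h1]
        simp [pvOctTake, h1, h2, pA_nil]
  | cons c cs ih =>
    intro st out hInv
    rw [List.foldl_cons]
    cases st with
    | N =>
      have hs : pvStep (PvSt.N, out) c = pvNormal out c := rfl
      rw [hs, ih _ _ (pvInv_normal out c)]
      simpa [pvPre] using pv_normal_sim out c cs
    | E =>
      by_cases hx : c = 'x'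
      · subst hx
        have hs : pvStep (PvSt.E, out) 'x' = (PvSt.X, out) := rfl
        rw [hs, ih _ _ (show pvInv PvSt.X from trivial)]
        simp [pvPre]
      · by_cases ho : pvIsOct c = true
        · have hs : pvStep (PvSt.E, out) c = (PvSt.O [c], out) := by
            simp [pvStep, hx, ho]
          rw [hs, ih _ _ (show pvInv (PvSt.O [c]) from ⟨by simpa using ho, by simp⟩)]
          simp [pvPre]
        · have hs : pvStep (PvSt.E, out) c
              = (PvSt.N, out ++ [PySem.Dict.getD pvEscDict c ((c.toNat : Int) % 256)]) := by
            simp [pvStep, hx, ho]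
          rw [hs, ih _ _ (show pvInv PvSt.N from trivial)]
          rw [show pvPre PvSt.E ++ c :: cs = '\\' :: c :: cs from rfl,
            pA_esc hx (by simpa using ho)]
          cases hE : PySem.Dict.get? pvEscDict c <;>
            simp [pvPre, PySem.Dict.getD, hE]
    | X =>
      by_cases hh : pvIsHex c = true
      · have hs : pvStep (PvSt.X, out) c = (PvSt.X2 c, out) := by simp [pvStep, hh]
        rw [hs, ih _ _ (show pvInv (PvSt.X2 c) from hh)]
        simp [pvPre]
      · have hs : pvStep (PvSt.X, out) c = pvNormal (out ++ [120]) c := by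
          simp [pvStep, hh]
        rw [hs, ih _ _ (pvInv_normal _ c), pv_normal_sim]
        rw [show pvPre PvSt.X ++ c :: cs = '\\' :: 'x' :: c :: cs from rfl,
          pA_x_fall (pvHexOK_false_head (by simpa using hh))]
        simp
    | X2 h =>
      have hInvh : pvIsHex h = true := hInv
      by_cases hh : pvIsHex c = true
      · have hs : pvStep (PvSt.X2 h, out) c
            = (PvSt.N, out ++ [pvHexVal h * 16 + pvHexVal c]) := by simp [pvStep, hh]
        rw [hs, ih _ _ (show pvInv PvSt.N from trivial)]
        rw [show pvPre (PvSt.X2 h) ++ c :: cs = '\\' :: 'x' :: h :: c :: cs from rfl,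
          pA_hex hInvh hh]
        simp [pvPre]
      · have hs : pvStep (PvSt.X2 h, out) c
            = pvNormal (out ++ [120, (h.toNat : Int)]) c := by simp [pvStep, hh]
        rw [hs, ih _ _ (pvInv_normal _ c), pv_normal_sim]
        rw [show pvPre (PvSt.X2 h) ++ c :: cs = '\\' :: 'x' :: h :: c :: cs from rfl,
          pA_x_fall (pvHexOK_false_snd (by simpa using hh)),
          pA_plain (pvHex_ne_bs hInvh), pvHex_mod hInvh]
        simp
    | O digs =>
      obtain ⟨hall, hlen⟩ := hInv
      by_cases hc : pvIsOct c = true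
      · rcases digs with _ | ⟨c1, _ | ⟨c2, _ | ⟨c3, t⟩⟩⟩ <;> simp at hlen
        · -- one remembered digit: keep collecting
          have hs : pvStep (PvSt.O [c1], out) c = (PvSt.O [c1, c], out) := by
            simp [pvStep, hc]
          have hInv' : pvInv (PvSt.O [c1, c]) := by
            refine ⟨?_, by simp⟩
            intro x hx'
            simp at hx'
            rcases hx' with rfl | rfl
            · exact hall _ (by simp)
            · exact hc
          rw [hs, ih _ _ hInv']
          simp [pvPre]
        · -- two remembered digits: the third completes the escape
          have h1 : pvIsOct c1 = true := hall _ (by simp)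
          have h2 : pvIsOct c2 = true := hall _ (by simp)
          have hs : pvStep (PvSt.O [c1, c2], out) c
              = (PvSt.N, out ++ [pvOctVal [c1, c2, c] % 256]) := by
            simp [pvStep, hc]
          rw [hs, ih _ _ (show pvInv PvSt.N from trivial)]
          rw [show pvPre (PvSt.O [c1, c2]) ++ c :: cs = '\\' :: c1 :: c2 :: c :: cs from rfl,
            pA_oct h1]
          simp [pvOctTake, h1, h2, hc, octTake_three, pvPre]
      · have hs : pvStep (PvSt.O digs, out) c
            = pvNormal (out ++ [pvOctVal digs % 256]) c := by
          simp [pvStep, hc]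
        rw [hs, ih _ _ (pvInv_normal _ c), pv_normal_sim]
        rcases digs with _ | ⟨c1, _ | ⟨c2, _ | ⟨c3, t⟩⟩⟩ <;> simp at hlen
        · have h1 : pvIsOct c1 = true := hall _ (by simp)
          rw [show pvPre (PvSt.O [c1]) ++ c :: cs = '\\' :: c1 :: c :: cs from rfl,
            pA_oct h1]
          simp [pvOctTake, h1, hc]
        · have h1 : pvIsOct c1 = true := hall _ (by simp)
          have h2 : pvIsOct c2 = true := hall _ (by simp)
          rw [show pvPre (PvSt.O [c1, c2]) ++ c :: cs = '\\' :: c1 :: c2 :: c :: cs from rfl,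
            pA_oct h1]
          simp [pvOctTake, h1, h2, hc]

-- the machine run on the whole body computes exactly A's parsed list
lemma pv_run_eq (cs : List Char) :
    (List.foldl pvStep (PvSt.N, []) cs).2 ++ pvFlush (List.foldl pvStep (PvSt.N, []) cs).1
      = pvParseA cs := by
  simpa [pvPre] using pv_sim cs PvSt.N [] trivial

-- ===== VERDICT (by name: the statement is the Claim_ definition above) =====
theorem render_bytes_literal_expr_py_spec : Claim_equal_render_bytes_literal_expr_py := by
  intro raw_repr _
  unfold Spec_render_bytes_literal_expr_py
  simp only [render_bytes_literal_expr_py, render_bytes_literal_expr_py_alt]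
  set raw := PySem.Str.strip raw_repr with hraw
  by_cases hsmall : raw.toList.length < 3
  · -- fewer than 3 characters: every guard route ends in ""
    have hB : PySem.Str.len raw < 3 := by rw [PySem.Str.len_eq]; omega
    rw [if_pos (Or.inl hB)]
    split_ifs <;> rfl
  · -- at least 3 characters
    rcases hL : raw.toList with _ | ⟨a, _ | ⟨b, _ | ⟨c0, t⟩⟩⟩ <;>
      (try (rw [hL] at hsmall; simp at hsmall))
    have hne : raw ≠ "" := fun he => by rw [he] at hL; simp at hL
    have hlen3 : ¬ PySem.Str.len raw < 3 := by rw [PySem.Str.len_eq, hL]; simp; omega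
    have hget0 : PySem.Str.pyGet? raw 0 = some a := by
      rw [show (0 : Int) = ((0 : Nat) : Int) from rfl, PySem.Str.pyGet?_natCast, hL]; rfl
    have hget1 : PySem.Str.pyGet? raw 1 = some b := by
      rw [show (1 : Int) = ((1 : Nat) : Int) from rfl, PySem.Str.pyGet?_natCast, hL]; rfl
    have hsw1 : PySem.Str.startswith raw "b\"" = true ↔ (a = 'b' ∧ b = '"') := by
      rw [PySem.Str.startswith_eq, hL, show ("b\"" : String).toList = ['b', '"'] from rfl,
        PySem.Chars.startswith_iff]
      simp [List.cons_prefix_cons, eq_comm]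
    have hsw2 : PySem.Str.startswith raw "b'" = true ↔ (a = 'b' ∧ b = '\'') := by
      rw [PySem.Str.startswith_eq, hL, show ("b'" : String).toList = ['b', '\''] from rfl,
        PySem.Chars.startswith_iff]
      simp [List.cons_prefix_cons, eq_comm]
    rw [if_neg hne]
    by_cases hb : a = 'b' ∧ (b = '"' ∨ b = '\'')
    · have hsw : PySem.Str.startswith raw "b\"" = true ∨ PySem.Str.startswith raw "b'" = true := by
        rcases hb.2 with h | h
        · exact Or.inl (hsw1.mpr ⟨hb.1, h⟩)
        · exact Or.inr (hsw2.mpr ⟨hb.1, h⟩)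
      rw [if_neg (not_not_intro hsw), if_neg hlen3]
      by_cases hq : PySem.Str.pyGet? raw (-1) = PySem.Str.pyGet? raw 1
      · rw [if_neg (not_not_intro hq),
          if_neg (by
            push Not
            refine ⟨by omega, ?_, ?_, hq⟩
            · rw [hget0, hb.1]
            · rw [hget1]
              rcases hb.2 with h | h
              · exact Or.inr (by rw [h])
              · exact Or.inl (by rw [h]))]
        simp only [pv_run_eq]
      · rw [if_pos hq, if_pos (Or.inr (Or.inr (Or.inr hq)))]
    · have hnsw : ¬ (PySem.Str.startswith raw "b\"" = true ∨ PySem.Str.startswith raw "b'" = true) := by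
        rintro (h | h)
        · exact hb ⟨(hsw1.mp h).1, Or.inl (hsw1.mp h).2⟩
        · exact hb ⟨(hsw2.mp h).1, Or.inr (hsw2.mp h).2⟩
      rw [if_pos hnsw,
        if_pos (by
          rcases Decidable.em (a = 'b') with ha | ha
          · refine Or.inr (Or.inr (Or.inl ?_))
            rw [hget1]
            rintro (h | h)
            · exact hb ⟨ha, Or.inr (by injection h)⟩
            · exact hb ⟨ha, Or.inl (by injection h)⟩
          · exact Or.inr (Or.inl (by rw [hget0]; intro h; exact ha (by injection h))))]
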